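-- pv_equiv track=rewrite | github.com/divyajeettt/sequences | sequences/__init__.py | semiprime
-- ===== SOURCE A (Python) =====
-- def check(n: int) -> int:
--     """checks if arg 'n' is a positive int"""
--
--     if not isinstance(n, int):
--         raise TypeError ("'n' must be an int")
--     if n <= 0:
--         raise ValueError ("'n' must be a positive integer")
--     return n
--
-- def isprime(n: int) -> list[int]:
--     """returns True if n is prime"""
--
--     if n in range(2, 4):
--         return True
--
--     for i in range(2, int(pow(n, 0.5) + 1)):
--         if not (n % i):
--             return False
--     return True
--
-- def semiprime(n: int) -> list[int]:
--     """returns the first n Semi-Prime Numbers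
--     Semi-Prime Number:
--         the product of two prime numbers, not necessarily distinct"""
--
--     n, numbers, num = check(n), list(), 4
--
--     def factors(x):
--         """returns the number of prime factors of x (not unique)"""
--
--         total, i = 0, 2
--         while x != 1:
--             if not isprime(i):
--                 i += 1
--             if not (x % i):
--                 x //= i
--                 total += 1
--             else:
--                 i += 1
--         return total
--
--     while len(numbers) < n:
--         if factors(num) == 2:
--             numbers.append(num)
--         num += 1
--
--     return numbers
-- ===== SOURCE B (Python) =====
-- def semiprime(n: int) -> list[int]:
--     """returns the first n Semi-Prime Numbers.
--     For each candidate, find its smallest prime factor by trial division up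
--     to sqrt; the number is semiprime iff the cofactor is prime."""
--     if not isinstance(n, int):
--         raise TypeError("'n' must be an int")
--     if n <= 0:
--         raise ValueError("'n' must be a positive integer")
--     out = []
--     num = 4
--     while len(out) < n:
--         d = 2
--         while d * d <= num and num % d:
--             d += 1
--         if d * d <= num:          # num is composite; d is its smallest prime factor
--             q = num // d
--             e = 2
--             while e * e <= q and q % e:
--                 e += 1
--             if e * e > q:         # cofactor q is prime -> exactly two prime factors
--                 out.append(num)
--         num += 1
--     return out
-- ===== Notes on version B (the rewrite author's own statement) =====
-- stated objective: faster
-- what changed: A counts all prime factors of each candidate with a loop that walks i upward calling a trial-division primality test on every i; B finds the smallest divisor d by trial division up to sqrt(num) and accepts iff the cofactor num//d is prime (one sqrt-bounded scan), so the per-candidate cost drops from ~O(P(num)*sqrt(num)) to O(sqrt(num)).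
import Mathlib
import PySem

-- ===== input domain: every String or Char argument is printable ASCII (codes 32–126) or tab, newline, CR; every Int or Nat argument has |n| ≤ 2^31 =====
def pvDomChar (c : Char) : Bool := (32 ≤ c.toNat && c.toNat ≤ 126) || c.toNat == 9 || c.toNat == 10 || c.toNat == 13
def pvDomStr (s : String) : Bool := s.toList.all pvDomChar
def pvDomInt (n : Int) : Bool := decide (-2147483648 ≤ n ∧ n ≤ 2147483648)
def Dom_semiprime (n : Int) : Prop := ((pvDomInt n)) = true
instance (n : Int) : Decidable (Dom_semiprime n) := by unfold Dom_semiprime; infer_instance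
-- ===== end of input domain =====

-- B replaces A's per-candidate prime-factor counting loop by one trial-division scan up to
-- sqrt(num) (smallest divisor, then primality of the cofactor); measurably faster.
-- All loop state in both Pythons is a nonnegative int, so both ports carry it in Nat and
-- map the result list back to Int at the end.

-- ===== PORT A =====
-- A's isprime; `int(pow(n, 0.5) + 1)` is ported as `Nat.sqrt n + 1`: exact on the inputs
-- reached here (the float sqrt can at most add one candidate i with i*i > n, which cannot
-- divide a composite n whose smaller factor was already tested, nor a prime n).
def isprimeA (n : Nat) : Bool :=
  if 2 ≤ n ∧ n < 4 then true
  else (List.range' 2 (Nat.sqrt n + 1 - 2)).all (fun i => ! (n % i == 0))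

-- the `while x != 1` loop of A's inner `factors`; Python runs it unbounded, the fuel
-- 3*x+4 is proved never exhausted for x ≥ 1 (faLoop_eq_Omega below)
def faLoop : Nat → Nat → Nat → Nat → Nat
  | 0, _, _, total => total
  | fuel+1, x, i, total =>
    if x = 1 then total
    else
      let i' := if isprimeA i then i else i + 1
      if x % i' = 0 then faLoop fuel (x / i') i' (total + 1)
      else faLoop fuel x (i' + 1) total

def factorsA (x : Nat) : Nat := faLoop (3 * x + 4) x 2 0

-- A's `while len(numbers) < n` loop; unbounded in Python, the fuel 2^(n+4) bounds the
-- index of the n-th semiprime (Bertrand: the n-th prime p satisfies 2*p ≤ 2^(n+1))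
def loopA : Nat → List Nat → Nat → Nat → List Nat
  | 0, acc, _, _ => acc
  | fuel+1, acc, num, n =>
    if acc.length < n then
      loopA fuel (if factorsA num = 2 then acc ++ [num] else acc) (num + 1) n
    else acc

def semiprime (n : Int) : List Int :=
  if n ≤ 0 then []   -- Python raises ValueError here (check); excluded by Pre_semiprime
  else (loopA (2 ^ (n.toNat + 4)) [] 4 n.toNat).map Int.ofNat

-- ===== PORT B =====
-- B's  `while d*d <= num and num % d: d += 1`  loop (used for both scans of Source B)
def findDiv (num : Nat) (d : Nat) : Nat :=
  if d * d ≤ num then (if num % d = 0 then d else findDiv num (d + 1)) else d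
termination_by num + 1 - d
decreasing_by
  rename_i h _
  have hd : d ≤ num := by nlinarith
  omega

-- B's per-candidate test: smallest divisor d with d*d ≤ num, then primality of num / d
def isSemiB (num : Nat) : Bool :=
  let d := findDiv num 2
  if d * d ≤ num then
    let q := num / d
    let e := findDiv q 2
    decide (q < e * e)
  else false

-- B's outer `while len(out) < n` loop; same unbounded Python while as A's, same fuel bound
def loopB : Nat → List Nat → Nat → Nat → List Nat
  | 0, acc, _, _ => acc
  | fuel+1, acc, num, n =>
    if acc.length < n then
      loopB fuel (if isSemiB num then acc ++ [num] else acc) (num + 1) n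
    else acc

def semiprime_alt (n : Int) : List Int :=
  if n ≤ 0 then []   -- Source B raises ValueError here; excluded by Pre_semiprime
  else (loopB (2 ^ (n.toNat + 4)) [] 4 n.toNat).map Int.ofNat

-- ===== PRECONDITION & SPEC =====
-- Python A raises ValueError on n <= 0 (and both Source B and A raise there); excluded.
def Pre_semiprime (n : Int) : Prop := 1 ≤ n
instance (n : Int) : Decidable (Pre_semiprime n) := by unfold Pre_semiprime; infer_instance
def pvWitness_semiprime : Int := (3)

def Spec_semiprime (n : Int) (out : List Int) : Prop := out = semiprime_alt n
instance (n : Int) (out : List Int) : Decidable (Spec_semiprime n out) := by unfold Spec_semiprime; infer_instance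

-- ===== CLAIM (what is proved, stated in full; the proofs are below) =====
def Claim_equal_semiprime : Prop := ∀ (n : Int), Dom_semiprime n → Pre_semiprime n → Spec_semiprime n (semiprime n)

-- ===== LEMMAS AND PROOFS =====

-- Ω(x): number of prime factors of x with multiplicity (proof-side notion only)
def Omega (x : Nat) : Nat := (Nat.primeFactorsList x).length

theorem Omega_mul (a b : Nat) (ha : a ≠ 0) (hb : b ≠ 0) : Omega (a * b) = Omega a + Omega b := by
  unfold Omega
  simpa using (Nat.perm_primeFactorsList_mul ha hb).length_eq

theorem Omega_prime (p : Nat) (hp : Nat.Prime p) : Omega p = 1 := by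
  unfold Omega; rw [Nat.primeFactorsList_prime hp]; rfl

theorem Omega_pos (m : Nat) (hm : 2 ≤ m) : 1 ≤ Omega m := by
  unfold Omega
  rcases hl : Nat.primeFactorsList m with _ | ⟨p, l⟩
  · have hprod := Nat.prod_primeFactorsList (n := m) (by omega)
    rw [hl] at hprod
    simp at hprod; omega
  · simp

theorem isprimeA_iff (n : Nat) (hn : 2 ≤ n) : isprimeA n = true ↔ Nat.Prime n := by
  unfold isprimeA
  by_cases h4 : n < 4
  · rw [if_pos ⟨hn, h4⟩]
    simp only [true_iff]
    interval_cases n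
    · exact Nat.prime_two
    · exact Nat.prime_three
  · rw [if_neg (by omega), List.all_eq_true]
    have hs2 : 2 ≤ Nat.sqrt n := by
      have h := Nat.sqrt_le_sqrt (show 4 ≤ n by omega)
      have h4 : Nat.sqrt 4 = 2 := by simpa using Nat.sqrt_eq 2
      omega
    constructor
    · intro hall
      rw [Nat.prime_def_le_sqrt]
      refine ⟨hn, fun m h2m hmsqrt => fun hdvd => ?_⟩
      have hmem : m ∈ List.range' 2 (Nat.sqrt n + 1 - 2) := by
        rw [List.mem_range'_1]; omega
      have hm := hall m hmem
      simp only [Bool.not_eq_eq_eq_not, Bool.not_true, beq_eq_false_iff_ne] at hm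
      exact hm (Nat.dvd_iff_mod_eq_zero.mp hdvd)
    · intro hp m hmem
      rw [List.mem_range'_1] at hmem
      simp only [Bool.not_eq_eq_eq_not, Bool.not_true, beq_eq_false_iff_ne]
      intro hmod
      exact (Nat.prime_def_le_sqrt.mp hp).2 m (by omega) (by omega)
        (Nat.dvd_iff_mod_eq_zero.mpr hmod)

theorem faLoop_eq_Omega (fuel x i total : Nat) (hx : 1 ≤ x) (hi : 2 ≤ i)
    (hinv : ∀ m, 2 ≤ m → m < i → ¬ m ∣ x)
    (hfuel : 3 * x + 4 - i ≤ fuel) (hfuel1 : 1 ≤ fuel) :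
    faLoop fuel x i total = total + Omega x := by
  induction fuel generalizing x i total with
  | zero => omega
  | succ f ih =>
    by_cases hx1 : x = 1
    · subst hx1
      simp [faLoop, Omega, Nat.primeFactorsList_one]
    · have hx2 : 2 ≤ x := by omega
      have hix : i ≤ x := by
        by_contra hgt
        exact hinv x hx2 (by omega) dvd_rfl
      set j := if isprimeA i then i else i + 1 with hj
      have hj2 : 2 ≤ j := by rw [hj]; split <;> omega
      have hji : i ≤ j ∧ j ≤ i + 1 := by rw [hj]; split <;> omega
      have hinv' : ∀ m, 2 ≤ m → m < j → ¬ m ∣ x := by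
        intro m h2m hmj
        by_cases hm : m < i
        · exact hinv m h2m hm
        · have hmi : m = i := by
            rw [hj] at hmj; split at hmj <;> omega
          subst hmi
          have hnp : ¬ Nat.Prime m := by
            intro hp
            have ht : isprimeA m = true := (isprimeA_iff m (by omega)).mpr hp
            rw [hj, if_pos ht] at hmj; omega
          obtain ⟨a, hadvd, ha2, halt⟩ := Nat.exists_dvd_of_not_prime2 (by omega) hnp
          intro hmx
          exact hinv a ha2 (by omega) (hadvd.trans hmx)
      have hjx : j ≤ x := by
        rcases Nat.lt_or_ge i x with hlt | hge
        · omega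
        · have hie : i = x := by omega
          have hxp : Nat.Prime i := by
            rw [Nat.prime_def_lt]
            refine ⟨by omega, fun m hm hdvd => ?_⟩
            rcases Nat.lt_or_ge m 2 with h2 | h2
            · have hm0 : m ≠ 0 := by
                rintro rfl; rw [Nat.zero_dvd] at hdvd; omega
              omega
            · rw [hie] at hdvd
              exact absurd hdvd (hinv m h2 hm)
          rw [hj, if_pos ((isprimeA_iff i (by omega)).mpr hxp)]; omega
      simp only [faLoop, if_neg hx1]
      rw [← hj]
      by_cases hdvd : x % j = 0
      · rw [if_pos hdvd]
        have hjdvd : j ∣ x := Nat.dvd_iff_mod_eq_zero.mpr hdvd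
        have hjp : Nat.Prime j := by
          rw [Nat.prime_def_lt]
          refine ⟨by omega, fun m hm hmdvd => ?_⟩
          rcases Nat.lt_or_ge m 2 with h2 | h2
          · have hm0 : m ≠ 0 := by
              rintro rfl; rw [Nat.zero_dvd] at hmdvd; omega
            omega
          · exact absurd (hmdvd.trans hjdvd) (hinv' m h2 hm)
        have hqmul : x / j * j = x := Nat.div_mul_cancel hjdvd
        have hq1 : 1 ≤ x / j := Nat.one_le_div_iff (by omega) |>.mpr (Nat.le_of_dvd (by omega) hjdvd)
        have h2q : 2 * (x / j) ≤ x := by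
          calc 2 * (x / j) ≤ j * (x / j) := Nat.mul_le_mul_right _ (by omega)
          _ = x := by rw [Nat.mul_comm]; exact hqmul
        have hinvq : ∀ m, 2 ≤ m → m < j → ¬ m ∣ x / j := by
          intro m h2m hmj hmdvd
          exact hinv' m h2m hmj (hmdvd.trans (Nat.div_dvd_of_dvd hjdvd))
        have hOm : Omega x = Omega (x / j) + 1 := by
          conv_lhs => rw [← hqmul]
          rw [Omega_mul _ _ (by omega) (by omega), Omega_prime j hjp]
        rw [ih (x / j) j (total + 1) (by omega) (by omega) hinvq (by omega) (by omega)]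
        omega
      · rw [if_neg hdvd]
        have hinvj : ∀ m, 2 ≤ m → m < j + 1 → ¬ m ∣ x := by
          intro m h2m hmj
          by_cases hm : m < j
          · exact hinv' m h2m hm
          · have : m = j := by omega
            subst this
            intro hmx
            exact hdvd (Nat.dvd_iff_mod_eq_zero.mp hmx)
        exact ih x (j + 1) total (by omega) (by omega) hinvj (by omega) (by omega)

theorem factorsA_eq_Omega (x : Nat) (hx : 1 ≤ x) : factorsA x = Omega x := by
  unfold factorsA
  simpa using faLoop_eq_Omega (3 * x + 4) x 2 0 hx le_rfl (fun m h2 hlt => absurd (lt_of_le_of_lt h2 hlt) (lt_irrefl _)) (by omega) (by omega)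

theorem findDiv_ge (num d : Nat) : d ≤ findDiv num d := by
  fun_induction findDiv num d with
  | case1 => exact le_rfl
  | case2 d _ _ ih => exact le_trans (by omega) ih
  | case3 => exact le_rfl

theorem findDiv_not_dvd (num d : Nat) :
    ∀ m, d ≤ m → m < findDiv num d → ¬ m ∣ num := by
  fun_induction findDiv num d with
  | case1 d _ _ => intro m h1 h2; omega
  | case2 d hle hmod ih =>
    intro m h1 h2
    rcases Nat.eq_or_lt_of_le h1 with rfl | hlt
    · intro hdvd
      exact hmod (Nat.dvd_iff_mod_eq_zero.mp hdvd)
    · exact ih m hlt h2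
  | case3 d _ => intro m h1 h2; omega

theorem findDiv_dvd (num d : Nat) (h : findDiv num d * findDiv num d ≤ num) :
    findDiv num d ∣ num := by
  fun_induction findDiv num d with
  | case1 d hle hmod => exact Nat.dvd_iff_mod_eq_zero.mpr hmod
  | case2 d hle hmod ih => exact ih h
  | case3 d hgt => omega

theorem Omega_eq_two_iff (num : Nat) (h : 1 ≤ num) :
    Omega num = 2 ↔ ∃ p q, Nat.Prime p ∧ Nat.Prime q ∧ num = p * q := by
  constructor
  · intro h2
    unfold Omega at h2
    have hprod := Nat.prod_primeFactorsList (n := num) (by omega)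
    rcases hl : Nat.primeFactorsList num with _ | ⟨p, l⟩ <;> rw [hl] at h2 hprod
    · simp at h2
    · rcases l with _ | ⟨q, l⟩
      · simp at h2
      · rcases l with _ | _
        · refine ⟨p, q, ?_, ?_, ?_⟩
          · exact Nat.prime_of_mem_primeFactorsList (by rw [hl]; simp)
          · exact Nat.prime_of_mem_primeFactorsList (by rw [hl]; simp)
          · simpa using hprod.symm
        · simp at h2
  · rintro ⟨p, q, hp, hq, rfl⟩
    rw [Omega_mul p q hp.pos.ne' hq.pos.ne', Omega_prime p hp, Omega_prime q hq]

theorem isSemiB_iff (num : Nat) (h : 1 ≤ num) : isSemiB num = true ↔ Omega num = 2 := by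
  unfold isSemiB
  set d := findDiv num 2 with hd
  have hd2 : 2 ≤ d := findDiv_ge num 2
  by_cases hdd : d * d ≤ num
  · have hdvd : d ∣ num := findDiv_dvd num 2 hdd
    have hdp : Nat.Prime d := by
      rw [Nat.prime_def_lt]
      refine ⟨hd2, fun m hm hmdvd => ?_⟩
      rcases Nat.lt_or_ge m 2 with hlt | hge
      · have hm0 : m ≠ 0 := by rintro rfl; rw [Nat.zero_dvd] at hmdvd; omega
        omega
      · exact absurd (hmdvd.trans hdvd) (findDiv_not_dvd num 2 m hge hm)
    set q := num / d with hqdef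
    have hq : q * d = num := Nat.div_mul_cancel hdvd
    have hq2 : 2 ≤ q := by
      rcases Nat.lt_or_ge q 2 with hlt | hge
      · interval_cases q <;> nlinarith
      · exact hge
    set e := findDiv q 2 with he
    have he2 : 2 ≤ e := findDiv_ge q 2
    rw [if_pos hdd]
    simp only [decide_eq_true_eq]
    constructor
    · intro hqe
      have hqp : Nat.Prime q := by
        rw [Nat.prime_def_le_sqrt]
        refine ⟨hq2, fun m h2m hms => ?_⟩
        have hmm : m * m ≤ q := Nat.le_sqrt.mp hms
        have hme : m < e := by nlinarith
        exact findDiv_not_dvd q 2 m h2m hme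
      rw [← hq, Omega_mul q d (by omega) (by omega), Omega_prime _ hqp, Omega_prime _ hdp]
    · intro hOm
      by_contra hqe
      rw [Nat.not_lt] at hqe
      have hedvd : e ∣ q := findDiv_dvd q 2 hqe
      have heq : q / e * e = q := Nat.div_mul_cancel hedvd
      have hqe2 : 2 ≤ q / e := le_trans he2 ((Nat.le_div_iff_mul_le (by omega)).mpr hqe)
      have hOq : 2 ≤ Omega q := by
        have h1 := Omega_pos (q / e) hqe2
        have h2 := Omega_pos e he2
        rw [← heq, Omega_mul _ _ (by omega) (by omega)]
        omega
      rw [← hq, Omega_mul q d (by omega) (by omega), Omega_prime d hdp] at hOm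
      omega
  · rw [if_neg hdd]
    simp only [Bool.false_eq_true, false_iff]
    intro hOm
    obtain ⟨p, qq, hp, hqq, hnum⟩ := (Omega_eq_two_iff num h).mp hOm
    have hkey : ∀ r s : Nat, Nat.Prime r → num = r * s → r * r ≤ num → False := by
      intro r s hr hrs hsq
      have hrd : ¬ r < d := fun hlt =>
        findDiv_not_dvd num 2 r hr.two_le hlt ⟨s, hrs⟩
      nlinarith
    by_cases hpq : p ≤ qq
    · exact hkey p qq hp hnum (by nlinarith)
    · exact hkey qq p hqq (by rw [hnum]; ring) (by nlinarith)

theorem loops_eq (fuel : Nat) : ∀ acc num n, 1 ≤ num → loopA fuel acc num n = loopB fuel acc num n := by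
  induction fuel with
  | zero => intro acc num n _; rfl
  | succ fuel ih =>
    intro acc num n hnum
    simp only [loopA, loopB]
    by_cases hlen : acc.length < n
    · simp only [if_pos hlen]
      have ht : (factorsA num = 2) ↔ (isSemiB num = true) := by
        rw [factorsA_eq_Omega num hnum, isSemiB_iff num hnum]
      by_cases h2 : Omega num = 2
      · rw [if_pos (by rwa [factorsA_eq_Omega num hnum]),
            if_pos (by rw [isSemiB_iff num hnum]; exact h2)]
        exact ih _ _ _ (by omega)
      · rw [if_neg (by rwa [factorsA_eq_Omega num hnum]),
            if_neg (by rw [show (isSemiB num = true) ↔ _ from isSemiB_iff num hnum]; exact h2)]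
        exact ih _ _ _ (by omega)
    · simp [if_neg hlen]

-- ===== VERDICT (by name: the statement is the Claim_ definition above) =====
theorem semiprime_spec : Claim_equal_semiprime := by
  intro n _ hpre
  unfold Spec_semiprime semiprime semiprime_alt
  have hn : ¬ n ≤ 0 := by unfold Pre_semiprime at hpre; omega
  rw [if_neg hn, if_neg hn, loops_eq _ _ _ _ (by omega)]
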